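-- pv_equiv track=rewrite | github.com/patwadeepak/data-structures-and-algorithms | codeforces/contests-participated/Codeforces Round 1058 (Div. 2)/A_MEX_Partition.py | solve
-- ===== SOURCE A (Python) =====
-- from collections import Counter
--
-- def solve(n, a):
--   f = Counter(a)
--   keys = set(f.keys())
--
--   if len(keys) == 1 and f[0] > 0:
--     return 1
--
--   i = 0
--   while f[i] > 0:
--     i += 1
--
--   return i
-- ===== SOURCE B (Python) =====
-- def solve(n, a):
--     mex = 0
--     for x in sorted(set(a)):
--         if x == mex:
--             mex += 1
--         elif x > mex:
--             break
--     return mex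
-- ===== Notes on version B (the rewrite author's own statement) =====
-- stated objective: simpler
-- what changed: Replaces the Counter plus upward hash-probe loop (and the redundant all-zeros special case, whose answer 1 the general rule already gives) with a single ordered scan over sorted(set(a)) maintaining the expected value.
import Mathlib
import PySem

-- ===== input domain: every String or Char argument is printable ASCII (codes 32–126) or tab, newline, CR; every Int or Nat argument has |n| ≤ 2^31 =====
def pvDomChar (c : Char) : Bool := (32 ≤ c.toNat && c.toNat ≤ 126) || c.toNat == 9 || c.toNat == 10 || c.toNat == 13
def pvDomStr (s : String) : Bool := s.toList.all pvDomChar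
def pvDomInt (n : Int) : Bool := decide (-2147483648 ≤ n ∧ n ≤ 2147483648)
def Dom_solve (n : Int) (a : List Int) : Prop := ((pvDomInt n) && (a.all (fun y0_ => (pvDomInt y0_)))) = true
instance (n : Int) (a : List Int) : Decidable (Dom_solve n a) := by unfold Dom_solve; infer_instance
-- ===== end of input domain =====

-- B replaces A's Counter + upward hash-probe (and its redundant all-zeros special case) with one
-- ordered scan over the sorted distinct values; objective: simpler.

-- ===== PORT A =====
-- 'while f[i] > 0: i += 1' ported with explicit fuel a.length + 1; the fuel is an upper
-- bound on the iterations (the first i with count 0 is at most len(a)), proved and used below.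
def solveLoop (f : PySem.Dict Int Int) (i : Int) : Nat → Int
  | 0 => i
  | fuel + 1 => if f.getD i 0 > 0 then solveLoop f (i + 1) fuel else i

def solve (n : Int) (a : List Int) : Int :=
  let f := PySem.Dict.counter a
  let keys : PySem.Set Int := PySem.Set.ofList f.keys
  if PySem.Set.len keys = 1 ∧ f.getD 0 0 > 0 then 1
  else solveLoop f 0 (a.length + 1)

-- ===== PORT B =====
def altLoop (mex : Int) : List Int → Int
  | [] => mex
  | x :: rest =>
    if x = mex then altLoop (mex + 1) rest
    else if x > mex then mex
    else altLoop mex rest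

def solve_alt (n : Int) (a : List Int) : Int :=
  altLoop 0 (PySem.List.sorted (PySem.Set.ofList a) (fun x => x) false)

-- ===== PRECONDITION & SPEC =====
def Spec_solve (n : Int) (a : List Int) (out : Int) : Prop := out = solve_alt n a
instance (n : Int) (a : List Int) (out : Int) : Decidable (Spec_solve n a out) := by unfold Spec_solve; infer_instance

-- ===== CLAIM (what is proved, stated in full; the proofs are below) =====
def Claim_equal_solve : Prop := ∀ (n : Int) (a : List Int), Dom_solve n a → Spec_solve n a (solve n a)

-- ===== LEMMAS AND PROOFS =====

theorem pyMex_exists (a : List Int) : ∃ m : Nat, ((m : Int) ∉ a) := by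
  have hle : ∀ (l : List Int), ∀ x ∈ l, x.natAbs ≤ (l.map Int.natAbs).foldr max 0 := by
    intro l
    induction l with
    | nil => simp
    | cons y ys ih =>
      intro x hx
      rw [List.mem_cons] at hx
      rcases hx with rfl | hx
      · simp
      · exact le_trans (ih x hx) (by simp)
  refine ⟨(a.map Int.natAbs).foldr max 0 + 1, fun hmem => ?_⟩
  have := hle a _ hmem
  simp only [Int.natAbs_natCast] at this
  omega

/-- The least natural number whose Int cast is not in `a` — the MEX both programs compute. -/
def pyMex (a : List Int) : Nat := Nat.find (pyMex_exists a)

theorem pyMex_not_mem (a : List Int) : ((pyMex a : Int)) ∉ a := Nat.find_spec (pyMex_exists a)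

theorem mem_of_lt_pyMex {a : List Int} {k : Nat} (h : k < pyMex a) : (k : Int) ∈ a := by
  have := Nat.find_min (pyMex_exists a) h
  simpa using this

theorem pyMex_eq_of {a : List Int} {m : Nat} (h1 : (m : Int) ∉ a)
    (h2 : ∀ j < m, (j : Int) ∈ a) : pyMex a = m := by
  rcases lt_trichotomy (pyMex a) m with h | h | h
  · exact absurd (h2 _ h) (pyMex_not_mem a)
  · exact h
  · exact absurd (mem_of_lt_pyMex h) h1

theorem pyMex_le_length (a : List Int) : pyMex a ≤ a.length := by
  have hinj : Set.InjOn (fun m : Nat => (m : Int)) (Finset.range (pyMex a)) :=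
    (Nat.cast_injective (R := Int)).injOn
  have hmap : ∀ m ∈ Finset.range (pyMex a), (fun m : Nat => (m : Int)) m ∈ a.toFinset := by
    intro m hm
    simp only [Finset.mem_range] at hm
    simpa using mem_of_lt_pyMex hm
  have := Finset.card_le_card_of_injOn _ hmap hinj
  simpa using this.trans a.toFinset_card_le

theorem solveLoop_eq (a : List Int) :
    ∀ fuel k : Nat, k ≤ pyMex a → pyMex a < k + fuel →
      solveLoop (PySem.Dict.counter a) (k : Int) fuel = (pyMex a : Int) := by
  intro fuel
  induction fuel with
  | zero => intro k h1 h2; omega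
  | succ fuel ih =>
    intro k h1 h2
    simp only [solveLoop, PySem.Dict.getD_counter]
    by_cases hk : k = pyMex a
    · subst hk
      have : a.count ((pyMex a : Int)) = 0 := List.count_eq_zero.mpr (pyMex_not_mem a)
      simp [this]
    · have hlt : k < pyMex a := lt_of_le_of_ne h1 hk
      have hc : 0 < a.count ((k : Int)) := List.count_pos_iff.mpr (mem_of_lt_pyMex hlt)
      have hpos : ((a.count ((k : Int)) : Int)) > 0 := by exact_mod_cast hc
      rw [if_pos hpos]
      have hcast : ((k : Int) + 1) = ((k + 1 : Nat) : Int) := by push_cast; ring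
      rw [hcast]
      exact ih (k + 1) (by omega) (by omega)

theorem altLoop_eq (a : List Int) :
    ∀ (s : List Int) (k : Nat), s.Pairwise (· < ·) →
      (∀ m : Nat, k ≤ m → ((m : Int) ∈ a ↔ (m : Int) ∈ s)) →
      k ≤ pyMex a →
      altLoop (k : Int) s = (pyMex a : Int) := by
  intro s
  induction s with
  | nil =>
    intro k _ hmem hle
    have : k = pyMex a := by
      by_contra hne
      have hlt : k < pyMex a := lt_of_le_of_ne hle hne
      exact absurd ((hmem k le_rfl).mp (mem_of_lt_pyMex hlt)) (by simp)
    simp [altLoop, this]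
  | cons x rest ih =>
    intro k hpw hmem hle
    have hpw' := (List.pairwise_cons.mp hpw).2
    have hx := (List.pairwise_cons.mp hpw).1
    simp only [altLoop]
    split_ifs with hxk hgt
    · -- x == mex: advance
      have hka : (k : Int) ∈ a := (hmem k le_rfl).mpr (by simp [hxk])
      have hklt : k < pyMex a := by
        rcases lt_or_eq_of_le hle with h | h
        · exact h
        · exact absurd (h ▸ hka) (pyMex_not_mem a)
      have hcast : ((k : Int) + 1) = ((k + 1 : Nat) : Int) := by push_cast; ring
      rw [hcast]
      refine ih (k + 1) hpw' ?_ (by omega)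
      intro m hm
      rw [hmem m (by omega), List.mem_cons]
      constructor
      · rintro (h | h)
        · have : m = k := by exact_mod_cast h.trans hxk
          omega
        · exact h
      · exact Or.inr
    · -- x > mex: the gap is here
      have : k = pyMex a := by
        by_contra hne
        have hlt : k < pyMex a := lt_of_le_of_ne hle hne
        have hka : (k : Int) ∈ x :: rest := (hmem k le_rfl).mp (mem_of_lt_pyMex hlt)
        rw [List.mem_cons] at hka
        rcases hka with h | h
        · omega
        · have := hx _ h; omega
      simp [this]
    · -- x < mex: skip
      have hxlt : x < (k : Int) := by omega
      refine ih k hpw' ?_ hle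
      intro m hm
      rw [hmem m hm, List.mem_cons]
      constructor
      · rintro (h | h)
        · exfalso
          have : (k : Int) ≤ (m : Int) := by exact_mod_cast hm
          omega
        · exact h
      · exact Or.inr

theorem solve_alt_eq (n : Int) (a : List Int) : solve_alt n a = (pyMex a : Int) := by
  unfold solve_alt
  have h0 : ((0 : Nat) : Int) = 0 := rfl
  rw [← h0]
  refine altLoop_eq a _ 0 (PySem.List.sorted_ofList_pairwise_lt a) ?_ (by omega)
  intro m _
  rw [PySem.List.mem_sorted, PySem.Set.mem_ofList]

theorem solve_eq (n : Int) (a : List Int) : solve n a = (pyMex a : Int) := by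
  unfold solve
  simp only [PySem.Dict.keys_counter, PySem.Set.ofList_ofList]
  split_ifs with hc
  · obtain ⟨hlen, hzero⟩ := hc
    rw [PySem.Dict.getD_counter] at hzero
    have h0mem : (0 : Int) ∈ a := List.count_pos_iff.mp (by exact_mod_cast hzero)
    have hl1 : (PySem.Set.ofList a).length = 1 := by
      have := hlen
      simp only [PySem.Set.len] at this
      exact_mod_cast this
    obtain ⟨y, hy⟩ := List.length_eq_one_iff.mp hl1
    have hsingle : ∀ x ∈ a, x = (0 : Int) := by
      intro x hxa
      have hxS : x ∈ PySem.Set.ofList a := (PySem.Set.mem_ofList a x).mpr hxa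
      have h0S : (0 : Int) ∈ PySem.Set.ofList a := (PySem.Set.mem_ofList a 0).mpr h0mem
      rw [hy, List.mem_singleton] at hxS h0S
      omega
    have h1 : ((1 : Nat) : Int) ∉ a := by
      intro h
      have := hsingle _ h
      norm_num at this
    have hm : pyMex a = 1 := pyMex_eq_of h1 (by intro j hj; interval_cases j; simpa using h0mem)
    simp [hm]
  · have h0 : ((0 : Nat) : Int) = 0 := rfl
    rw [← h0]
    exact solveLoop_eq a (a.length + 1) 0 (by omega) (by have := pyMex_le_length a; omega)

-- ===== VERDICT (by name: the statement is the Claim_ definition above) =====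
theorem solve_spec : Claim_equal_solve := by
  intro n a _
  unfold Spec_solve
  rw [solve_eq, solve_alt_eq]
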